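-- pv_equiv track=rewrite | github.com/skrishna1978/CodingChallenge-January-2019- | 1.11.2019 | stringPermutation.py | sloganGen
-- ===== SOURCE A (Python) =====
-- from itertools import permutations  #to user permutations() function for a list
--
-- def sloganGen(array):
--     list1=array #the array that came in
--     list2=[] #new blank array to hold unique values and generate permutation combos
--
--     for eachword in list1: #every word in original list
--         if eachword not in list2: #if word doesn't exist in blank array
--             list2+=[eachword] #add it
--
--     list3=list(permutations(list2)) #generate all permutations of list2 and return to list3
--     list3=[" ".join(x) for x in list3] #add new versions of list3 with each looping
--
--     return list3 #return final list back to calling function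
-- ===== SOURCE B (Python) =====
-- def sloganGen(array):
--     words = list(dict.fromkeys(array))
--     out = []
--
--     def permute(remaining, chosen):
--         if not remaining:
--             out.append(" ".join(chosen))
--             return
--         for i in range(len(remaining)):
--             permute(remaining[:i] + remaining[i + 1:], chosen + [remaining[i]])
--
--     permute(words, [])
--     return out
-- ===== Notes on version B (the rewrite author's own statement) =====
-- stated objective: alternative
-- what changed: B dedups with dict.fromkeys and replaces the itertools.permutations-then-join pipeline by a single recursive generator that fixes one position at a time and emits each joined slogan directly, with no intermediate list of tuples.
import Mathlib
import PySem

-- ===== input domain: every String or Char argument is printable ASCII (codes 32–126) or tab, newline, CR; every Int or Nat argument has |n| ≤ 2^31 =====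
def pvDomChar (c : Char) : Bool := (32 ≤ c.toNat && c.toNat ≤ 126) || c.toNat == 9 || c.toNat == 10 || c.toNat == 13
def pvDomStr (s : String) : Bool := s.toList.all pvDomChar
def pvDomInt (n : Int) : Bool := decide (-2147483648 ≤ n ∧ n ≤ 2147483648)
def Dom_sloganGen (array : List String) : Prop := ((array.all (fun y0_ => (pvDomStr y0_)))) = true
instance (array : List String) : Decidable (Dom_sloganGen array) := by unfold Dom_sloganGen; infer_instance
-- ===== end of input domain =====

-- B replaces the itertools.permutations + join pipeline by a single recursive generator that
-- emits each joined slogan directly (same output, different decomposition; objective: alternative).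

-- ===== PORT A =====
-- itertools.permutations(pool) (full length, distinct-by-position): for each index i in order,
-- pool[i] followed by the permutations of pool without index i; permutations of [] is [()].
def pvPermsA (l : List String) : List (List String) :=
  if l.isEmpty then [[]]
  else (List.range l.length).attach.flatMap
    (fun i => (pvPermsA (l.eraseIdx i.1)).map (fun p => l.getD i.1 "" :: p))
termination_by l.length
decreasing_by
  have := List.mem_range.mp i.2
  simp [List.length_eraseIdx, this]; omega

def sloganGen (array : List String) : List String :=
  let list2 := array.foldl (fun l2 w => if l2.contains w then l2 else l2 ++ [w]) []
  let list3 := pvPermsA list2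
  list3.map (fun x => PySem.Str.join " " x)

-- ===== PORT B =====
-- permute(remaining, chosen): when remaining is empty emit " ".join(chosen), else for each i
-- recurse on remaining without index i, with remaining[i] appended to chosen.
def pvPermute (remaining chosen : List String) : List String :=
  if remaining.isEmpty then [PySem.Str.join " " chosen]
  else (List.range remaining.length).attach.flatMap
    (fun i => pvPermute (remaining.eraseIdx i.1) (chosen ++ [remaining.getD i.1 ""]))
termination_by remaining.length
decreasing_by
  have := List.mem_range.mp i.2
  simp [List.length_eraseIdx, this]; omega

def sloganGen_alt (array : List String) : List String :=
  pvPermute (PySem.List.dedup array) []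

-- ===== PRECONDITION & SPEC =====
def Spec_sloganGen (array : List String) (out : List String) : Prop := out = sloganGen_alt array
instance (array : List String) (out : List String) : Decidable (Spec_sloganGen array out) := by unfold Spec_sloganGen; infer_instance

-- ===== CLAIM (what is proved, stated in full; the proofs are below) =====
def Claim_equal_sloganGen : Prop := ∀ (array : List String), Dom_sloganGen array → Spec_sloganGen array (sloganGen array)

-- ===== LEMMAS AND PROOFS =====

-- A's dedup loop is exactly PySem.Set.ofList, i.e. dict.fromkeys order.
theorem pv_dedup_loop_eq (array : List String) :
    array.foldl (fun l2 w => if l2.contains w then l2 else l2 ++ [w]) [] =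
      PySem.List.dedup array := by
  rw [PySem.List.dedup_eq_ofList, PySem.Set.ofList_eq_foldl]
  rfl

-- The fused recursion equals "permutations, then join with the accumulated prefix".
theorem pv_permute_eq (rem chosen : List String) :
    pvPermute rem chosen =
      (pvPermsA rem).map (fun p => PySem.Str.join " " (chosen ++ p)) := by
  rw [pvPermute.eq_def, pvPermsA.eq_def]
  split
  · simp
  · rw [List.map_flatMap]
    refine List.flatMap_congr (fun i _ => ?_)
    have := List.mem_range.mp i.2
    rw [pv_permute_eq (rem.eraseIdx i.1) (chosen ++ [rem.getD i.1 ""])]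
    rw [List.map_map]
    refine List.map_congr_left (fun p _ => ?_)
    simp
termination_by rem.length
decreasing_by
  have := List.mem_range.mp i.2
  simp [List.length_eraseIdx, this]; omega

-- ===== VERDICT (by name: the statement is the Claim_ definition above) =====
theorem sloganGen_spec : Claim_equal_sloganGen := by
  intro array _
  unfold Spec_sloganGen sloganGen sloganGen_alt
  rw [pv_dedup_loop_eq, pv_permute_eq]
  simp
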